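-- pv_equiv track=rewrite | github.com/cyrillemidingoyi/agrometflow | src/agrometflow/projections/cmip6.py | get_common_models
-- ===== SOURCE A (Python) =====
-- from functools import reduce
--
-- def get_common_models(Y):
--     all_model_sets = []
--     for exp_dict in Y.values():  # loop over each experiment
--         for model_list in exp_dict.values():  # loop over each variable
--             all_model_sets.append(set(model_list))
--     if not all_model_sets:
--         return set()
--     return reduce(set.intersection, all_model_sets)
-- ===== SOURCE B (Python) =====
-- def get_common_models(Y):
--     n = 0
--     counts = {}
--     for exp_dict in Y.values():
--         for model_list in exp_dict.values():
--             n += 1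
--             for m in set(model_list):
--                 counts[m] = counts.get(m, 0) + 1
--     return {m for m in counts if counts[m] == n}
-- ===== Notes on version B (the rewrite author's own statement) =====
-- stated objective: alternative
-- what changed: Replaces the reduce(set.intersection) fold over per-variable model sets with a single counting pass: a dict counts in how many of the N model lists each model occurs (deduped per list), and the result is the models whose count equals N.
import Mathlib
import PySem

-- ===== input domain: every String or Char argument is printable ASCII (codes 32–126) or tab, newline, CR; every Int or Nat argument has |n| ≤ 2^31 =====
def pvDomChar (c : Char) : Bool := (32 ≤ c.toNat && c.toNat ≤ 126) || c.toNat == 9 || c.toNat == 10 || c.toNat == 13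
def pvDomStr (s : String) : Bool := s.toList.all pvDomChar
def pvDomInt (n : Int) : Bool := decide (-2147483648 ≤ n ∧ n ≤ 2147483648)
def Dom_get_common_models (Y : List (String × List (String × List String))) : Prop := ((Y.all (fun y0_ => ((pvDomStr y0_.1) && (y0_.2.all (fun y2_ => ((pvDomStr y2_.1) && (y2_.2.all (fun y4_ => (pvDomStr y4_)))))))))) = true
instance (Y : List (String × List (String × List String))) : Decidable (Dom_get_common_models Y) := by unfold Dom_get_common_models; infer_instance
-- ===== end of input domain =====

-- B replaces A's shrinking pairwise set-intersection fold by one counting pass plus a count = N threshold (alternative decomposition, same result).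

-- ===== PORT A =====
def get_common_models (Y : List (String × List (String × List String))) : List String :=
  let all_model_sets : List (PySem.Set String) :=
    Y.foldl (fun acc exp_dict =>
      exp_dict.2.foldl (fun acc2 model_list => acc2 ++ [PySem.Set.ofList model_list.2]) acc) []
  match all_model_sets with
  | [] => []
  | h :: t => t.foldl PySem.Set.inter h

-- ===== PORT B =====
def get_common_models_alt (Y : List (String × List (String × List String))) : List String :=
  let st : Int × PySem.Dict String Int :=
    Y.foldl (fun st exp_dict =>
      exp_dict.2.foldl (fun st model_list =>
        (st.1 + 1,
         (PySem.Set.ofList model_list.2).foldl (fun d m => d.modify m 0 (· + 1)) st.2)) st)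
      (0, PySem.Dict.empty)
  st.2.keys.filter (fun m => st.2.getD m 0 == st.1)

-- ===== PRECONDITION & SPEC =====
def Spec_get_common_models (Y : List (String × List (String × List String))) (out : List String) : Prop := out = get_common_models_alt Y
instance (Y : List (String × List (String × List String))) (out : List String) : Decidable (Spec_get_common_models Y out) := by unfold Spec_get_common_models; infer_instance

-- ===== CLAIM =====
def Claim_equal_get_common_models : Prop := ∀ (Y : List (String × List (String × List String))), Dom_get_common_models Y → Spec_get_common_models Y (get_common_models Y)

-- ===== LEMMAS AND PROOFS =====

-- the list of per-variable model sets, in traversal order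
def pvSets (Y : List (String × List (String × List String))) : List (PySem.Set String) :=
  Y.flatMap (fun p => p.2.map (fun q => PySem.Set.ofList q.2))

lemma pvA_fold (Y : List (String × List (String × List String)))
    (acc : List (PySem.Set String)) :
    Y.foldl (fun acc exp_dict =>
      exp_dict.2.foldl (fun acc2 model_list => acc2 ++ [PySem.Set.ofList model_list.2]) acc) acc
    = acc ++ pvSets Y := by
  induction Y generalizing acc with
  | nil => simp [pvSets]
  | cons p Y ih =>
    rw [List.foldl_cons, PySem.List.foldl_append_singleton_eq_map, ih]
    simp [pvSets, List.flatMap_cons]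

lemma pvA_eq (Y : List (String × List (String × List String))) :
    get_common_models Y =
      match pvSets Y with
      | [] => []
      | h :: t => t.foldl PySem.Set.inter h := by
  unfold get_common_models
  rw [pvA_fold]
  rfl

lemma pvB_inner (l : List (String × List String)) (n : Int) (d : PySem.Dict String Int) :
    l.foldl (fun st model_list =>
        ((st : Int × PySem.Dict String Int).1 + 1,
         (PySem.Set.ofList model_list.2).foldl (fun d m => d.modify m 0 (· + 1)) st.2)) (n, d)
    = (n + (l.length : Int),
       ((l.map (fun q => PySem.Set.ofList q.2)).flatten).foldl (fun d m => d.modify m 0 (· + 1)) d) := by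
  induction l generalizing n d with
  | nil => simp
  | cons q l ih =>
    simp only [List.foldl_cons, ih, List.map_cons, List.flatten_cons, List.foldl_append,
      List.length_cons, Prod.mk.injEq]
    exact ⟨by push_cast; ring, trivial⟩

lemma pvB_state (Y : List (String × List (String × List String))) (n : Int)
    (d : PySem.Dict String Int) :
    Y.foldl (fun st exp_dict =>
      exp_dict.2.foldl (fun st model_list =>
        ((st : Int × PySem.Dict String Int).1 + 1,
         (PySem.Set.ofList model_list.2).foldl (fun d m => d.modify m 0 (· + 1)) st.2)) st)
      (n, d)
    = (n + ((pvSets Y).length : Int),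
       ((pvSets Y).flatten).foldl (fun d m => d.modify m 0 (· + 1)) d) := by
  induction Y generalizing n d with
  | nil => simp [pvSets]
  | cons p Y ih =>
    simp only [List.foldl_cons, pvB_inner, ih, pvSets, List.flatMap_cons, List.length_append,
      List.flatten_append, List.foldl_append, Prod.mk.injEq, List.length_map]
    exact ⟨by push_cast; ring, trivial⟩

lemma pvNodup_sets (Y : List (String × List (String × List String))) :
    ∀ s ∈ pvSets Y, s.Nodup := by
  intro s hs
  simp only [pvSets, List.mem_flatMap, List.mem_map] at hs
  obtain ⟨p, _, q, _, rfl⟩ := hs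
  exact PySem.Set.nodup_ofList q.2

lemma pvCount_flatten (L : List (PySem.Set String)) (m : String) (hnd : ∀ s ∈ L, s.Nodup) :
    L.flatten.count m = L.countP (fun s => s.contains m) := by
  induction L with
  | nil => simp
  | cons s L ih =>
    simp only [List.flatten_cons, List.count_append, List.countP_cons,
      ih (fun x hx => hnd x (List.mem_cons_of_mem s hx)), PySem.Set.contains_eq_listContains]
    by_cases hm : m ∈ s
    · rw [List.count_eq_one_of_mem (hnd s (List.mem_cons_self)) hm]
      simp [hm, Nat.add_comm]
    · rw [List.count_eq_zero.mpr hm]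
      simp [hm]

lemma pvFoldl_inter (t : List (PySem.Set String)) (h : PySem.Set String) :
    t.foldl PySem.Set.inter h = h.filter (fun m => t.all (fun s => s.contains m)) := by
  induction t generalizing h with
  | nil => simp
  | cons s t ih =>
    simp only [List.foldl_cons, ih, PySem.Set.inter, List.filter_filter, List.all_cons]
    apply List.filter_congr
    intro m _
    simp [Bool.and_comm]

lemma pvMain (L : List (PySem.Set String)) :
    (∀ s ∈ L, s.Nodup) →
    (match L with
     | [] => ([] : List String)
     | h :: t => t.foldl PySem.Set.inter h)
    = (PySem.Set.ofList L.flatten).filter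
        (fun m => ((L.flatten.count m : Int) == (L.length : Int))) := by
  intro hnd
  match L with
  | [] => rfl
  | h :: t =>
    have hh : h.Nodup := hnd h List.mem_cons_self
    have hcnt : ∀ m : String, (((h :: t).flatten.count m : Int) == ((h :: t).length : Int)) =
        (decide (m ∈ h) && t.all (fun s => s.contains m)) := by
      intro m
      rw [pvCount_flatten _ m hnd]
      by_cases hcase : m ∈ h ∧ ∀ s ∈ t, m ∈ s
      · have : (h :: t).countP (fun s => s.contains m) = (h :: t).length := by
          rw [List.countP_eq_length]
          intro s hs
          rcases List.mem_cons.mp hs with rfl | hs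
          · simpa [PySem.Set.contains_iff] using hcase.1
          · simpa [PySem.Set.contains_iff] using hcase.2 s hs
        rw [this]
        simp [hcase.1]
        exact hcase.2
      · have hlt : (h :: t).countP (fun s => s.contains m) < (h :: t).length := by
          rcases Nat.lt_or_ge ((h :: t).countP (fun s => s.contains m)) (h :: t).length with hlt | hge
          · exact hlt
          · exfalso
            have heq : (h :: t).countP (fun s => s.contains m) = (h :: t).length :=
              Nat.le_antisymm List.countP_le_length hge
            rw [List.countP_eq_length] at heq
            refine hcase ⟨?_, ?_⟩
            · simpa [PySem.Set.contains_iff] using heq h List.mem_cons_self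
            · intro s hs
              simpa [PySem.Set.contains_iff] using heq s (List.mem_cons_of_mem h hs)
        have hne : ¬ (m ∈ h ∧ ∀ s ∈ t, m ∈ s) := hcase
        have : ¬ (decide (m ∈ h) && t.all (fun s => s.contains m)) = true := by
          simp only [Bool.and_eq_true, decide_eq_true_eq, List.all_eq_true]
          rintro ⟨h1, h2⟩
          exact hne ⟨h1, fun s hs => (PySem.Set.contains_iff s m).mp (h2 s hs)⟩
        rw [Bool.not_eq_true] at this
        rw [this]
        simp only [beq_eq_false_iff_ne, ne_eq, Nat.cast_inj]
        omega
    rw [show (match h :: t with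
         | [] => ([] : List String)
         | h :: t => t.foldl PySem.Set.inter h) = t.foldl PySem.Set.inter h from rfl,
      pvFoldl_inter]
    rw [show PySem.Set.ofList (h :: t).flatten = PySem.Set.ofList (h ++ t.flatten) from rfl,
      PySem.Set.ofList_append, PySem.Set.update_eq_append_filter,
      PySem.Set.ofList_eq_self_of_nodup h hh, List.filter_append]
    have h2 : (List.filter (fun y => !PySem.Set.contains h y) (PySem.Set.ofList t.flatten)).filter
        (fun m => (((h :: t).flatten.count m : Int) == ((h :: t).length : Int))) = [] := by
      rw [List.filter_eq_nil_iff]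
      intro m hm
      have hmh : m ∉ h := by
        have := List.of_mem_filter hm
        simpa [PySem.Set.contains_iff] using this
      rw [hcnt m]
      simp [hmh]
    rw [h2, List.append_nil]
    apply List.filter_congr
    intro m hm
    rw [hcnt m]
    simp [hm]

-- ===== VERDICT =====
theorem get_common_models_spec : Claim_equal_get_common_models := by
  intro Y _
  unfold Spec_get_common_models
  rw [pvA_eq, pvMain (pvSets Y) (pvNodup_sets Y)]
  unfold get_common_models_alt
  rw [pvB_state]
  simp only [zero_add, PySem.Dict.keys_foldl_modify, PySem.Dict.getD_foldl_modify_add_one,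
    PySem.Dict.getD_empty, PySem.Dict.keys_empty, PySem.Set.update_nil_left, zero_add]
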